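-- pv_equiv track=rewrite | github.com/Sefaria/Sefaria-Data | sources/Rashi_on_Nach/convert_hebrew.py | get_vtitle
-- ===== SOURCE A (Python) =====
-- versionTitles = """Isaiah
-- ---
-- Isaiah, English translation by I.W. Slotki, Soncino Press, 1949
-- https://www.nli.org.il/en/books/NNL_ALEPH002642658/NLI
--
-- ---
--
-- Jeremiah
-- ---
-- Jeremiah, English translation by H. Freedman, Soncino Press, 1949
-- https://www.nli.org.il/en/books/NNL_ALEPH002579486/NLI
--
-- ---
--
-- Ezekiel
-- ---
-- Ezekiel, English translation by S. Fisch, Soncino Press, 1950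
-- https://www.nli.org.il/en/books/NNL_ALEPH002642688/NLI
--
-- ---
--
-- The Twelve Prophets
-- ---
-- The Twelve Prophets, English translation by A. Cohen, Soncino Press, 1948
-- https://www.nli.org.il/en/books/NNL_ALEPH002644211/NLI
--
-- ---
--
-- Psalms
-- ---
-- The Psalms, English translation by A. Cohen, Soncino Press, 1945
-- https://www.nli.org.il/en/books/NNL_ALEPH002643011/NLI
--
-- ---
--
-- Proverbs
-- ---
-- Proverbs, English translation by A. Cohen, Soncino Press, 1945
-- https://www.nli.org.il/en/books/NNL_ALEPH002643042/NLI
--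
-- ---
--
-- Job
-- ---
-- Job, English translation by Victor E. Reichert, Soncino Press, 1946
-- https://www.nli.org.il/en/books/NNL_ALEPH002643064/NLI
--
-- ---
--
-- The Five Megilloth
-- ---
-- The Five Megilloth, English translation by A. Cohen, Soncino Press, 1946
-- https://www.nli.org.il/en/books/NNL_ALEPH002644163/NLI
--
-- ---
--
-- Daniel, Ezra and Nehemiah
-- ---
-- Daniel, Ezra and Nehemiah, English translation by Judah J. Slotki, Soncino Press, 1951
-- https://www.nli.org.il/en/books/NNL_ALEPH002644183/NLI
--
-- ---
--
-- Chronicles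
-- ---
-- Chronicles, English translation by I.W. Slotki, Soncino Press, 1952
-- https://www.nli.org.il/en/books/NNL_ALEPH002644317/NLI""".split("---")
--
-- def get_vtitle(desired_title):
--     curr = ""
--     if desired_title.startswith("Chronicles"):
--         desired_title = "Chronicles"
--     elif desired_title in ["Daniel", "Ezra", "Nehemiah"]:
--         desired_title = "Daniel, Ezra and Nehemiah"
--     elif desired_title in ["Song of Songs", "Ruth", "Esther", "Lamentations", "Ecclesiastes"]:
--         desired_title = "The Five Megilloth"
--
--     for i, title in enumerate(versionTitles):
--         if i % 2 == 1:
--             if curr == desired_title: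
--                 return [t for t in title.splitlines() if t.strip()]
--         else:
--             curr = title.strip()
--     else:
--         return ["The Twelve Prophets, English translation by A. Cohen, Soncino Press, 1948", "https://www.nli.org.il/en/books/NNL_ALEPH002644211/NLI"]
-- ===== SOURCE B (Python) =====
-- versionTitles = """Isaiah
-- ---
-- Isaiah, English translation by I.W. Slotki, Soncino Press, 1949
-- https://www.nli.org.il/en/books/NNL_ALEPH002642658/NLI
--
-- ---
--
-- Jeremiah
-- ---
-- Jeremiah, English translation by H. Freedman, Soncino Press, 1949
-- https://www.nli.org.il/en/books/NNL_ALEPH002579486/NLI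
--
-- ---
--
-- Ezekiel
-- ---
-- Ezekiel, English translation by S. Fisch, Soncino Press, 1950
-- https://www.nli.org.il/en/books/NNL_ALEPH002642688/NLI
--
-- ---
--
-- The Twelve Prophets
-- ---
-- The Twelve Prophets, English translation by A. Cohen, Soncino Press, 1948
-- https://www.nli.org.il/en/books/NNL_ALEPH002644211/NLI
--
-- ---
--
-- Psalms
-- ---
-- The Psalms, English translation by A. Cohen, Soncino Press, 1945
-- https://www.nli.org.il/en/books/NNL_ALEPH002643011/NLI
--
-- ---
--
-- Proverbs
-- ---
-- Proverbs, English translation by A. Cohen, Soncino Press, 1945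
-- https://www.nli.org.il/en/books/NNL_ALEPH002643042/NLI
--
-- ---
--
-- Job
-- ---
-- Job, English translation by Victor E. Reichert, Soncino Press, 1946
-- https://www.nli.org.il/en/books/NNL_ALEPH002643064/NLI
--
-- ---
--
-- The Five Megilloth
-- ---
-- The Five Megilloth, English translation by A. Cohen, Soncino Press, 1946
-- https://www.nli.org.il/en/books/NNL_ALEPH002644163/NLI
--
-- ---
--
-- Daniel, Ezra and Nehemiah
-- ---
-- Daniel, Ezra and Nehemiah, English translation by Judah J. Slotki, Soncino Press, 1951
-- https://www.nli.org.il/en/books/NNL_ALEPH002644183/NLI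
--
-- ---
--
-- Chronicles
-- ---
-- Chronicles, English translation by I.W. Slotki, Soncino Press, 1952
-- https://www.nli.org.il/en/books/NNL_ALEPH002644317/NLI""".split("---")
--
--
-- def _pairs(xs):
--     """Consecutive (even-index, odd-index) pairs of xs."""
--     if len(xs) < 2:
--         return []
--     return [(xs[0], xs[1])] + _pairs(xs[2:])
--
--
-- # Full title -> content-lines table, built once from the segment list.
-- _TABLE = {k.strip(): [t for t in v.splitlines() if t.strip()]
--           for k, v in _pairs(versionTitles)}
--
-- _DEFAULT = ["The Twelve Prophets, English translation by A. Cohen, Soncino Press, 1948",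
--             "https://www.nli.org.il/en/books/NNL_ALEPH002644211/NLI"]
--
--
-- def get_vtitle(desired_title):
--     if desired_title.startswith("Chronicles"):
--         desired_title = "Chronicles"
--     elif desired_title in ["Daniel", "Ezra", "Nehemiah"]:
--         desired_title = "Daniel, Ezra and Nehemiah"
--     elif desired_title in ["Song of Songs", "Ruth", "Esther", "Lamentations", "Ecclesiastes"]:
--         desired_title = "The Five Megilloth"
--     return _TABLE.get(desired_title, _DEFAULT)
-- ===== Notes on version B (the rewrite author's own statement) =====
-- stated objective: simpler
-- what changed: A's enumerate loop with a parity counter, a mutable current-title state and a mid-loop early return is replaced by a title-to-content-lines dict built once by pairing consecutive segments, so the function body becomes the three normalization guards plus a single dict lookup with the Twelve Prophets default.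
import Mathlib
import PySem

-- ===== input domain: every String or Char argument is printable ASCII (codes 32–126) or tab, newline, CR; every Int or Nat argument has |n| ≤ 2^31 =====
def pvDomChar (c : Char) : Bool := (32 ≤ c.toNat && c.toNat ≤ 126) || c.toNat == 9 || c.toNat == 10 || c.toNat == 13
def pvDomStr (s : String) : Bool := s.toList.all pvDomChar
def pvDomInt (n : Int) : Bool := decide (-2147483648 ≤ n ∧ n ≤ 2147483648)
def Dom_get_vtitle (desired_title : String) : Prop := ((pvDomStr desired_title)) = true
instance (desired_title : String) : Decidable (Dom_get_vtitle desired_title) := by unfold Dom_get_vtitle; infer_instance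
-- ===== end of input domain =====

-- B replaces A's parity-counting scan-and-return with one precomputed title→lines table and a
-- single dict lookup with a default (objective: simpler).

-- module-level constant shared by both sources: versionTitles = <raw literal>.split("---"),
-- transcribed here as the resulting list of segments (data, not code; checked against CPython)
def pvVersionTitles : List String := ["Isaiah\n",
 "\nIsaiah, English translation by I.W. Slotki, Soncino Press, 1949\nhttps://www.nli.org.il/en/books/NNL_ALEPH002642658/NLI\n\n",
 "\n\nJeremiah\n",
 "\nJeremiah, English translation by H. Freedman, Soncino Press, 1949\nhttps://www.nli.org.il/en/books/NNL_ALEPH002579486/NLI\n\n",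
 "\n\nEzekiel\n",
 "\nEzekiel, English translation by S. Fisch, Soncino Press, 1950\nhttps://www.nli.org.il/en/books/NNL_ALEPH002642688/NLI\n\n",
 "\n\nThe Twelve Prophets\n",
 "\nThe Twelve Prophets, English translation by A. Cohen, Soncino Press, 1948\nhttps://www.nli.org.il/en/books/NNL_ALEPH002644211/NLI\n\n",
 "\n\nPsalms\n",
 "\nThe Psalms, English translation by A. Cohen, Soncino Press, 1945\nhttps://www.nli.org.il/en/books/NNL_ALEPH002643011/NLI\n\n",
 "\n\nProverbs\n",
 "\nProverbs, English translation by A. Cohen, Soncino Press, 1945\nhttps://www.nli.org.il/en/books/NNL_ALEPH002643042/NLI\n\n",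
 "\n\nJob\n",
 "\nJob, English translation by Victor E. Reichert, Soncino Press, 1946\nhttps://www.nli.org.il/en/books/NNL_ALEPH002643064/NLI\n\n",
 "\n\nThe Five Megilloth\n",
 "\nThe Five Megilloth, English translation by A. Cohen, Soncino Press, 1946\nhttps://www.nli.org.il/en/books/NNL_ALEPH002644163/NLI\n\n",
 "\n\nDaniel, Ezra and Nehemiah\n",
 "\nDaniel, Ezra and Nehemiah, English translation by Judah J. Slotki, Soncino Press, 1951\nhttps://www.nli.org.il/en/books/NNL_ALEPH002644183/NLI\n\n",
 "\n\nChronicles\n",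
 "\nChronicles, English translation by I.W. Slotki, Soncino Press, 1952\nhttps://www.nli.org.il/en/books/NNL_ALEPH002644317/NLI"]

-- ===== PORT A =====
-- the `for i, title in enumerate(versionTitles)` loop with its trailing `else: return default`
def pvALoop (pairs : List (Int × String)) (curr desired : String) : List String :=
  match pairs with
  | [] => ["The Twelve Prophets, English translation by A. Cohen, Soncino Press, 1948",
           "https://www.nli.org.il/en/books/NNL_ALEPH002644211/NLI"]
  | (i, title) :: rest =>
    if PySem.Int.mod i 2 == 1 then
      if curr == desired then
        (PySem.Str.splitlines title).filter (fun t => PySem.Str.strip t != "")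
      else pvALoop rest curr desired
    else pvALoop rest (PySem.Str.strip title) desired

def get_vtitle (desired_title : String) : List String :=
  let d :=
    if PySem.Str.startswith desired_title "Chronicles" then "Chronicles"
    else if ["Daniel", "Ezra", "Nehemiah"].contains desired_title then
      "Daniel, Ezra and Nehemiah"
    else if ["Song of Songs", "Ruth", "Esther", "Lamentations", "Ecclesiastes"].contains desired_title then
      "The Five Megilloth"
    else desired_title
  pvALoop (PySem.List.enumerate pvVersionTitles) "" d

-- ===== PORT B =====
-- _pairs: consecutive (even-index, odd-index) pairs
def pvPairs : List String → List (String × String)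
  | a :: b :: rest => (a, b) :: pvPairs rest
  | _ => []

-- the body of the dict comprehension: full-title key → filtered content lines
def pvF (kv : String × String) : String × List String :=
  (PySem.Str.strip kv.1,
   (PySem.Str.splitlines kv.2).filter (fun t => PySem.Str.strip t != ""))

-- _TABLE
def pvTable : PySem.Dict String (List String) :=
  PySem.Dict.ofList ((pvPairs pvVersionTitles).map pvF)

-- _DEFAULT
def pvDefault : List String :=
  ["The Twelve Prophets, English translation by A. Cohen, Soncino Press, 1948",
   "https://www.nli.org.il/en/books/NNL_ALEPH002644211/NLI"]

def get_vtitle_alt (desired_title : String) : List String :=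
  let d :=
    if PySem.Str.startswith desired_title "Chronicles" then "Chronicles"
    else if ["Daniel", "Ezra", "Nehemiah"].contains desired_title then
      "Daniel, Ezra and Nehemiah"
    else if ["Song of Songs", "Ruth", "Esther", "Lamentations", "Ecclesiastes"].contains desired_title then
      "The Five Megilloth"
    else desired_title
  PySem.Dict.getD pvTable d pvDefault

-- ===== PRECONDITION & SPEC =====
def Spec_get_vtitle (desired_title : String) (out : List String) : Prop := out = get_vtitle_alt desired_title
instance (desired_title : String) (out : List String) : Decidable (Spec_get_vtitle desired_title out) := by unfold Spec_get_vtitle; infer_instance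

-- ===== CLAIM (what is proved, stated in full; the proofs are below) =====
def Claim_equal_get_vtitle : Prop := ∀ (desired_title : String), Dom_get_vtitle desired_title → Spec_get_vtitle desired_title (get_vtitle desired_title)

-- ===== LEMMAS AND PROOFS =====

-- first-match association lookup: the common shape both sides reduce to
def pvLookup? : List (String × List String) → String → Option (List String)
  | [], _ => none
  | (k, v) :: rest, t => if k == t then some v else pvLookup? rest t

theorem pvLookup?_eq_none (l : List (String × List String)) (t : String)
    (h : t ∉ l.map Prod.fst) : pvLookup? l t = none := by
  induction l with
  | nil => rfl
  | cons kv rest ih =>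
    obtain ⟨k, v⟩ := kv
    simp only [List.map_cons, List.mem_cons, not_or] at h
    rw [pvLookup?]
    simp only [beq_iff_eq]
    rw [if_neg (fun hkt => h.1 hkt.symm)]
    exact ih h.2

-- A's parity scan started at an even index is the first-match lookup over the (title, content) pairs
theorem pvALoop_pairs (xs : List String) (s : Int) (curr t : String)
    (hs : PySem.Int.mod s 2 = 0) :
    pvALoop (PySem.List.enumerate xs s) curr t
      = (pvLookup? ((pvPairs xs).map pvF) t).getD pvDefault := by
  induction xs using pvPairs.induct generalizing s curr with
  | case1 a b rest ih =>
    have e1 : PySem.Int.mod s 2 = s % 2 := PySem.Int.mod_eq_emod_of_pos (by omega)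
    have e2 : PySem.Int.mod (s + 1) 2 = (s + 1) % 2 := PySem.Int.mod_eq_emod_of_pos (by omega)
    have e3 : PySem.Int.mod (s + 1 + 1) 2 = (s + 1 + 1) % 2 := PySem.Int.mod_eq_emod_of_pos (by omega)
    rw [e1] at hs
    have h1 : (PySem.Int.mod s 2 == 1) = false := by rw [e1]; simp; omega
    have h2 : (PySem.Int.mod (s + 1) 2 == 1) = true := by rw [e2]; simp; omega
    have h3 : PySem.Int.mod (s + 1 + 1) 2 = 0 := by rw [e3]; omega
    rw [PySem.List.enumerate_cons, PySem.List.enumerate_cons]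
    rw [pvALoop, h1]
    simp only [Bool.false_eq_true, if_false]
    rw [pvALoop, h2]
    simp only [if_true]
    rw [pvPairs]
    simp only [List.map_cons, pvLookup?, pvF]
    by_cases hc : PySem.Str.strip a == t
    · simp [hc]
    · simp only [Bool.not_eq_true] at hc
      rw [hc]
      simp only [Bool.false_eq_true, if_false]
      exact ih (s + 1 + 1) (PySem.Str.strip a) h3
  | case2 xs h2 =>
    cases xs with
    | nil => simp [PySem.List.enumerate_nil, pvALoop, pvPairs, pvLookup?, pvDefault]
    | cons a tail =>
      cases tail with
      | nil =>
        have e1 : PySem.Int.mod s 2 = s % 2 := PySem.Int.mod_eq_emod_of_pos (by omega)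
        have h1 : (PySem.Int.mod s 2 == 1) = false := by rw [e1] at hs ⊢; simp; omega
        rw [PySem.List.enumerate_cons, pvALoop, h1]
        simp [PySem.List.enumerate_nil, pvALoop, pvPairs, pvLookup?, pvDefault]
      | cons b rest => exact (h2 a b rest rfl).elim

-- get? after updating with pairwise-fresh keys: the first (= only) match in the pairs, else the old dict
theorem pvGet?_update (l : List (String × List String)) (d : PySem.Dict String (List String))
    (t : String) (h : (d.keys ++ l.map Prod.fst).Nodup) :
    (d.update l).get? t = (pvLookup? l t).or (d.get? t) := by
  induction l generalizing d with
  | nil => simp [PySem.Dict.update, pvLookup?]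
  | cons kv rest ih =>
    obtain ⟨k, v⟩ := kv
    have hkd : k ∉ d.keys := by
      intro hk
      exact (List.disjoint_of_nodup_append h) hk (by simp)
    have hkc : d.contains k = false := by
      rcases Bool.eq_false_or_eq_true (d.contains k) with hb | hb
      · exact absurd ((PySem.Dict.contains_iff_mem_keys d k).mp hb) hkd
      · exact hb
    have hkeys : (d.insert k v).keys = d.keys ++ [k] :=
      PySem.Dict.keys_insert_of_not_contains d v hkc
    have hnodup : ((d.insert k v).keys ++ rest.map Prod.fst).Nodup := by
      rw [hkeys, List.append_assoc]
      simpa using h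
    have hrest : ((d.insert k v).update rest).get? t = (pvLookup? rest t).or ((d.insert k v).get? t) := by
      simpa using ih (d.insert k v) hnodup
    have hstep : d.update ((k, v) :: rest) = (d.insert k v).update rest := rfl
    rw [hstep, hrest, PySem.Dict.get?_insert, pvLookup?]
    by_cases ht : t = k
    · subst ht
      have hrnone : pvLookup? rest t = none := by
        apply pvLookup?_eq_none
        have h2 := (List.nodup_append.mp h).2.1
        simp only [List.map_cons, List.nodup_cons] at h2
        exact h2.1
      simp [hrnone]
    · simp only [beq_iff_eq]
      rw [if_neg ht, if_neg (fun hkt => ht hkt.symm)]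

-- getD on a dict built from pairs with distinct keys is the first-match lookup with the default
theorem pvGetD_ofList (l : List (String × List String)) (t : String)
    (h : (l.map Prod.fst).Nodup) :
    PySem.Dict.getD (PySem.Dict.ofList l) t pvDefault = (pvLookup? l t).getD pvDefault := by
  have : PySem.Dict.ofList l = PySem.Dict.empty.update l := rfl
  rw [PySem.Dict.getD_eq_get?_getD, this,
      pvGet?_update l PySem.Dict.empty t (by simpa [PySem.Dict.keys_empty] using h),
      PySem.Dict.get?_empty, Option.or_none]

-- ===== VERDICT (by name: the statement is the Claim_ definition above) =====
theorem get_vtitle_spec : Claim_equal_get_vtitle := by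
  intro d _
  unfold Spec_get_vtitle get_vtitle get_vtitle_alt
  rw [pvTable]
  rw [pvGetD_ofList _ _ (by decide)]
  exact pvALoop_pairs pvVersionTitles 0 "" _ (by decide)
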